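-- pv_equiv track=rewrite | github.com/cirosantilli/project-euler-solutions | solvers/713.py | L
-- ===== SOURCE A (Python) =====
-- def L(N: int) -> int:
--     """
--     L(N) = sum_{m=2..N} T(N, m)
--
--     Uses grouping over constant floor(N/k) where k = m-1, yielding O(sqrt(N)).
--     """
--     if N < 2:
--         return 0
--
--     total = 0
--     k = 1
--     k_end = N - 1
--
--     while k <= k_end:
--         q = N // k
--         k_max = N // q
--         if k_max > k_end:
--             k_max = k_end
--
--         cnt = k_max - k + 1
--         sum_k = (k + k_max) * cnt // 2  # arithmetic series
--
--         # T(k) = N*q - k*q*(q+1)/2  where q = floor(N/k)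
--         total += cnt * N * q - (q * (q + 1) // 2) * sum_k
--
--         k = k_max + 1
--
--     return total
-- ===== SOURCE B (Python) =====
-- def L(N: int) -> int:
--     if N < 2:
--         return 0
--     # integer square root of N by trial increment (O(sqrt N))
--     r = 1
--     while (r + 1) * (r + 1) <= N:
--         r += 1
--     total = 0
--     # small k: one term per k = 1..r
--     for k in range(1, r + 1):
--         q = N // k
--         total += N * q - k * (q * (q + 1) // 2)
--     # large k (r < k <= N-1): one block per quotient value q, k-interval (lo, hi]
--     for q in range(r, 0, -1):
--         lo = max(r, N // (q + 1))
--         hi = min(N // q, N - 1)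
--         cnt = hi - lo
--         total += cnt * N * q - (q * (q + 1) // 2) * ((lo + 1 + hi) * cnt // 2)
--     return total
-- ===== Notes on version B (the rewrite author's own statement) =====
-- stated objective: alternative
-- what changed: Replaced A's single while-loop over k that jumps block-to-block via the next-block start N//(N//k) by a hyperbola split: direct per-k terms for k up to isqrt(N) (found by trial increment), then one closed-form block per descending quotient value q with explicit clipped interval endpoints.
import Mathlib
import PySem

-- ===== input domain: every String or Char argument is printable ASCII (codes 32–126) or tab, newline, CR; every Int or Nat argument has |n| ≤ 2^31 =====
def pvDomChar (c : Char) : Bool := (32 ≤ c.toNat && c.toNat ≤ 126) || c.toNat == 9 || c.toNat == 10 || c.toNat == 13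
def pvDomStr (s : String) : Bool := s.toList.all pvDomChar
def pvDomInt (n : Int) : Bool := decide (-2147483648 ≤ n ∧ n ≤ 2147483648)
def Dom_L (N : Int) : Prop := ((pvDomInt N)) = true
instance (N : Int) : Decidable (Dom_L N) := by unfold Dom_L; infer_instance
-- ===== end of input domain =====

-- B replaces A's jumping-k block walk by a hyperbola split: per-k terms up to isqrt(N),
-- then one closed-form block per quotient value q (objective: alternative, same O(sqrt N) cost).

-- ===== PORT A =====
-- the while loop of A; 'fuel' only makes the recursion structural and is provably sufficient
def LloopA (N kend : Int) : Nat → Int → Int → Int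
  | 0, total, _k => total
  | (fuel+1), total, k =>
    if k ≤ kend then
      let q := PySem.Int.floordiv N k
      let kmax' := PySem.Int.floordiv N q
      let kmax := if kmax' > kend then kend else kmax'
      let cnt := kmax - k + 1
      let sumk := PySem.Int.floordiv ((k + kmax) * cnt) 2
      LloopA N kend fuel (total + (cnt * N * q - PySem.Int.floordiv (q * (q + 1)) 2 * sumk)) (kmax + 1)
    else total

def L (N : Int) : Int :=
  if N < 2 then 0 else LloopA N (N - 1) (N - 1).toNat 0 1

-- ===== PORT B =====
-- B's trial-increment isqrt loop; 'fuel' only makes it structural and is provably sufficient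
def LsqrtLoop (N : Int) : Nat → Int → Int
  | 0, r => r
  | (fuel+1), r => if (r + 1) * (r + 1) ≤ N then LsqrtLoop N fuel (r + 1) else r

-- B's per-k term: N*q - k*(q*(q+1)//2) with q = N//k
def Lterm (N k : Int) : Int :=
  let q := PySem.Int.floordiv N k
  N * q - k * PySem.Int.floordiv (q * (q + 1)) 2

-- body of B's second loop (one block per quotient value q)
def LstepB (N r total q : Int) : Int :=
  let lo := max r (PySem.Int.floordiv N (q + 1))
  let hi := min (PySem.Int.floordiv N q) (N - 1)
  let cnt := hi - lo
  total + (cnt * N * q - PySem.Int.floordiv (q * (q + 1)) 2 * PySem.Int.floordiv ((lo + 1 + hi) * cnt) 2)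

def L_alt (N : Int) : Int :=
  if N < 2 then 0
  else
    let r := LsqrtLoop N N.toNat 1
    let t1 := (PySem.List.pyRange 1 (r + 1) 1).foldl (fun total k => total + Lterm N k) 0
    (PySem.List.pyRange r 0 (-1)).foldl (LstepB N r) t1

-- ===== PRECONDITION & SPEC =====
def Spec_L (N : Int) (out : Int) : Prop := out = L_alt N
instance (N : Int) (out : Int) : Decidable (Spec_L N out) := by unfold Spec_L; infer_instance

-- ===== CLAIM (what is proved, stated in full; the proofs are below) =====
def Claim_equal_L : Prop := ∀ (N : Int), Dom_L N → Spec_L N (L N)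

-- ===== LEMMAS AND PROOFS =====

-- the mathematical value both programs accumulate: sum of the per-k term over [a, b)
def Lsum (N a b : Int) : Int := ((PySem.List.pyRange a b 1).map (Lterm N)).sum

theorem foldl_add_Lterm (N : Int) : ∀ (l : List Int) (t : Int),
    l.foldl (fun total k => total + Lterm N k) t = t + (l.map (Lterm N)).sum := by
  intro l
  induction l with
  | nil => intro t; simp
  | cons x xs ih => intro t; simp [List.foldl_cons, ih, add_assoc]

theorem Lsum_empty (N a b : Int) (h : b ≤ a) : Lsum N a b = 0 := by
  simp [Lsum, PySem.List.pyRange_one_eq_nil h]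

theorem Lsum_split (N a c b : Int) (h1 : a ≤ c) (h2 : c ≤ b) :
    Lsum N a b = Lsum N a c + Lsum N c b := by
  unfold Lsum
  rw [PySem.List.pyRange_one_append a c b h1 h2, List.map_append, List.sum_append]

-- 2 * (sum of j over range a (a+n)) = (2a + n - 1) * n
theorem two_mul_sum_range (n : Nat) : ∀ (a : Int),
    2 * ((PySem.List.pyRange a (a + n) 1).map id).sum = (2 * a + n - 1) * n := by
  induction n with
  | zero =>
    intro a
    rw [show a + ((0:Nat):Int) = a by push_cast; ring, PySem.List.pyRange_one_eq_nil le_rfl]; simp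
  | succ m ih =>
    intro a
    have h : a + (m.succ : Int) = (a + m) + 1 := by push_cast; ring
    rw [h, PySem.List.pyRange_one_succ_right (by omega : a ≤ a + (m : Int)),
      List.map_append, List.sum_append]
    have := ih a
    push_cast
    push_cast at this
    simp only [List.map_cons, List.map_nil, List.sum_cons, List.sum_nil, id]
    linarith

theorem sum_affine (N c h : Int) : ∀ (l : List Int), (∀ j ∈ l, Lterm N j = c - j * h) →
    (l.map (Lterm N)).sum = l.length * c - h * ((l.map id).sum) := by
  intro l
  induction l with
  | nil => intro _; simp
  | cons x xs ih =>
    intro hall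
    simp only [List.map_cons, List.sum_cons, List.length_cons, id]
    rw [hall x (by simp), ih (fun j hj => hall j (by simp [hj]))]
    push_cast
    ring

-- a block [a, m] on which N//j is the constant q sums in closed form
theorem block_sum (N a m q : Int) (ha : 0 < a) (ham : a ≤ m + 1)
    (hconst : ∀ j, a ≤ j → j ≤ m → N / j = q) :
    Lsum N a (m + 1) =
      (m - a + 1) * N * q - (q * (q + 1)) / 2 * (((a + m) * (m - a + 1)) / 2) := by
  have hconst' : ∀ j ∈ PySem.List.pyRange a (m + 1) 1, Lterm N j = N * q - j * ((q * (q + 1)) / 2) := by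
    intro j hj
    rw [PySem.List.mem_pyRange_one] at hj
    have hj0 : 0 < j := by omega
    have hdj : N / j = q := hconst j hj.1 (by omega)
    simp only [Lterm, PySem.Int.floordiv_eq_ediv_of_pos hj0,
      PySem.Int.floordiv_eq_ediv_of_pos (by norm_num : (0:Int) < 2), hdj]
  rw [Lsum, sum_affine N (N * q) ((q * (q + 1)) / 2) _ hconst']
  have hlen : ((PySem.List.pyRange a (m + 1) 1).length : Int) = m - a + 1 := by
    rw [PySem.List.length_pyRange_one]; omega
  obtain ⟨n, hn⟩ : ∃ n : Nat, (n : Int) = m + 1 - a := ⟨(m + 1 - a).toNat, by omega⟩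
  have hrange : m + 1 = a + (n : Int) := by omega
  have hsum2 : 2 * ((PySem.List.pyRange a (m + 1) 1).map id).sum = (a + m) * (m - a + 1) := by
    rw [hrange, two_mul_sum_range n a]; rw [hn]; ring
  have hsum : ((PySem.List.pyRange a (m + 1) 1).map id).sum = ((a + m) * (m - a + 1)) / 2 := by
    rw [← hsum2, Int.mul_ediv_cancel_left _ (by norm_num)]
  rw [hlen, hsum]
  ring

-- floor(N/j) is constant (= q = floor(N/k)) for k ≤ j ≤ floor(N/q); positive operands
theorem ediv_const_block (N k j : Int) (hk : 1 ≤ k) (hq : 0 < N / k) (hkj : k ≤ j)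
    (hj : j ≤ N / (N / k)) : N / j = N / k := by
  have hj0 : 0 < j := by omega
  have h1 : N / k ≤ N / j := by
    rw [Int.le_ediv_iff_mul_le hj0]
    have := (Int.le_ediv_iff_mul_le hq).mp hj
    linarith
  have h2 : N / j ≤ N / k := by
    have hlt : N < (N / k + 1) * k := Int.lt_ediv_add_one_mul_self N (by omega)
    have h3 : N < (N / k + 1) * j := by nlinarith
    have := (Int.ediv_lt_iff_lt_mul hj0).mpr h3
    omega
  omega

-- loop invariant of A: with enough fuel, the loop adds Lsum N k N to total
theorem loopA_eq (N : Int) (_hN : 2 ≤ N) : ∀ (fuel : Nat) (k total : Int), 1 ≤ k →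
    (N - k).toNat ≤ fuel → LloopA N (N - 1) fuel total k = total + Lsum N k N := by
  intro fuel
  induction fuel with
  | zero =>
    intro k total hk hfuel
    have : N ≤ k := by omega
    simp [LloopA, Lsum_empty N k N this]
  | succ f ih =>
    intro k total hk hfuel
    by_cases hkend : k ≤ N - 1
    · have hk0 : 0 < k := by omega
      have hq : 0 < N / k := by
        have h1 : (1 : Int) ≤ N / k := (Int.le_ediv_iff_mul_le (by omega)).mpr (by omega)
        omega
      have hkq : k ≤ N / (N / k) := by
        rw [Int.le_ediv_iff_mul_le hq]
        have h := Int.ediv_mul_le N (b := k) (by omega)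
        linarith
      simp only [LloopA, if_pos hkend]
      rw [PySem.Int.floordiv_eq_ediv_of_pos hk0, PySem.Int.floordiv_eq_ediv_of_pos hq,
        PySem.Int.floordiv_eq_ediv_of_pos (by norm_num : (0:Int) < 2),
        PySem.Int.floordiv_eq_ediv_of_pos (by norm_num : (0:Int) < 2)]
      set kmax : Int := if N / (N / k) > N - 1 then N - 1 else N / (N / k) with hkmax
      have hkm1 : k ≤ kmax := by rw [hkmax]; split <;> omega
      have hkm2 : kmax ≤ N - 1 := by rw [hkmax]; split <;> omega
      have hkm3 : kmax ≤ N / (N / k) := by rw [hkmax]; split <;> omega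
      rw [ih (kmax + 1) _ (by omega) (by omega)]
      rw [Lsum_split N k (kmax + 1) N (by omega) (by omega),
        block_sum N k kmax (N / k) hk0 (by omega)
          (fun j hj1 hj2 => ediv_const_block N k j hk hq hj1 (by omega))]
      ring
    · simp only [LloopA, if_neg hkend]
      rw [Lsum_empty N k N (by omega)]
      ring

-- B's isqrt loop: with enough fuel it returns the integer square root of N
theorem sqrtLoop_eq (N : Int) (hN : 2 ≤ N) : ∀ (fuel : Nat) (r : Int), 1 ≤ r → r * r ≤ N →
    (N - r).toNat ≤ fuel →
    1 ≤ LsqrtLoop N fuel r ∧ LsqrtLoop N fuel r * LsqrtLoop N fuel r ≤ N ∧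
      N < (LsqrtLoop N fuel r + 1) * (LsqrtLoop N fuel r + 1) := by
  intro fuel
  induction fuel with
  | zero =>
    intro r hr1 hr2 hfuel
    exfalso
    have hNr : N ≤ r := by omega
    nlinarith
  | succ f ih =>
    intro r hr1 hr2 hfuel
    by_cases h : (r + 1) * (r + 1) ≤ N
    · have hstep : r + 1 ≤ N := by nlinarith
      simpa [LsqrtLoop, if_pos h] using ih (r + 1) (by omega) h (by omega)
    · simp only [LsqrtLoop, if_neg h]
      exact ⟨hr1, hr2, not_le.mp h⟩

-- B's second loop, processing q, q-1, …, 1, accumulates the terms for all k in (max r (N//(q+1)), N-1]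
theorem loopB2_eq (N r : Int) (hN : 2 ≤ N) (hr1 : 1 ≤ r) (hr2 : r * r ≤ N)
    (_hr3 : N < (r + 1) * (r + 1)) :
    ∀ (j : Nat) (q t : Int), (q : Int) = (j : Int) → 1 ≤ q → q ≤ r →
      (PySem.List.pyRange q 0 (-1)).foldl (LstepB N r) t =
        t + Lsum N (max r (N / (q + 1)) + 1) N := by
  intro j
  induction j with
  | zero => intro q t hqj hq1 _; omega
  | succ m ih =>
    intro q t hqj hq1 hqr
    have hq0 : 0 < q := by omega
    have hq10 : 0 < q + 1 := by omega
    have hrN1 : r ≤ N - 1 := by nlinarith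
    set lo := max r (N / (q + 1)) with hlodef
    set hi := min (N / q) (N - 1) with hhidef
    have hrq : r ≤ N / q := by
      rw [Int.le_ediv_iff_mul_le hq0]; nlinarith
    have hlohi : lo ≤ hi := by
      rw [hlodef, hhidef]
      have h1 : N / (q + 1) ≤ N / q := by
        rw [Int.le_ediv_iff_mul_le hq0]
        have := Int.ediv_mul_le N (b := q + 1) (by omega)
        nlinarith [Int.le_of_lt hq10, Int.ediv_nonneg (by omega : (0:Int) ≤ N) (by omega : (0:Int) ≤ q+1)]
      have h2 : N / (q + 1) ≤ N - 1 := by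
        have : N / (q + 1) < N := (Int.ediv_lt_iff_lt_mul hq10).mpr (by nlinarith)
        omega
      omega
    -- every k in (lo, hi] has N // k = q
    have hconst : ∀ k, lo + 1 ≤ k → k ≤ hi → N / k = q := by
      intro k hk1 hk2
      have hk0 : 0 < k := by omega
      have hlok : N / (q + 1) < k := by
        have : N / (q + 1) ≤ lo := by rw [hlodef]; omega
        omega
      have hup : N / k < q + 1 := by
        rw [Int.ediv_lt_iff_lt_mul hk0]
        have h1 : N < (N / (q + 1) + 1) * (q + 1) := Int.lt_ediv_add_one_mul_self N hq10
        nlinarith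
      have hdown : q ≤ N / k := by
        rw [Int.le_ediv_iff_mul_le hk0]
        have hkq : k ≤ N / q := by rw [hhidef] at hk2; omega
        have := (Int.le_ediv_iff_mul_le hq0).mp hkq
        linarith
      omega
    -- one step of the loop
    have hstep : LstepB N r t q = t + Lsum N (lo + 1) (hi + 1) := by
      rw [block_sum N (lo + 1) hi q (by positivity) (by omega) (fun k h1 h2 => hconst k h1 h2)]
      simp only [LstepB, PySem.Int.floordiv_eq_ediv_of_pos hq0,
        PySem.Int.floordiv_eq_ediv_of_pos hq10,
        PySem.Int.floordiv_eq_ediv_of_pos (by norm_num : (0:Int) < 2), ← hlodef, ← hhidef]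
      ring_nf
    rw [PySem.List.pyRange_neg_one_cons hq0, List.foldl_cons, hstep]
    by_cases hq1' : q = 1
    · subst hq1'
      rw [show ((1:Int) - 1) = 0 by ring, PySem.List.pyRange_neg_one_eq_nil le_rfl]
      simp only [List.foldl_nil]
      have hhiN : hi = N - 1 := by rw [hhidef, Int.ediv_one]; omega
      rw [hhiN]
      ring_nf
    · have hq2 : 2 ≤ q := by omega
      rw [ih (q - 1) _ (by omega) (by omega) (by omega)]
      -- chaining: hi = max r (N / q) for the next (q-1) round, since q ≥ 2 and q ≤ r
      have hhiq : hi = N / q := by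
        have : N / q < N := (Int.ediv_lt_iff_lt_mul hq0).mpr (by nlinarith)
        rw [hhidef]; omega
      have hchain : max r (N / (q - 1 + 1)) = hi := by
        rw [show q - 1 + 1 = q by ring, hhiq]
        omega
      rw [hchain, Lsum_split N (lo + 1) (hi + 1) N (by omega) ?side]
      · ring
      · have : hi ≤ N - 1 := by rw [hhidef]; omega
        omega

-- ===== VERDICT (by name: the statement is the Claim_ definition above) =====
theorem L_spec : Claim_equal_L := by
  intro N _
  unfold Spec_L L L_alt
  by_cases hN : N < 2
  · simp [hN]
  · simp only [if_neg hN]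
    push Not at hN
    obtain ⟨hr1, hr2, hr3⟩ := sqrtLoop_eq N hN N.toNat 1 le_rfl (by nlinarith) (by omega)
    set r := LsqrtLoop N N.toNat 1 with hrdef
    have hrN1 : r ≤ N - 1 := by nlinarith
    rw [loopA_eq N hN (N - 1).toNat 1 0 (by norm_num) (by omega)]
    rw [loopB2_eq N r hN hr1 hr2 hr3 r.toNat r _ (by omega) hr1 le_rfl]
    · rw [foldl_add_Lterm N (PySem.List.pyRange 1 (r + 1) 1) 0]
      have hmax : max r (N / (r + 1)) = r := by
        have : N / (r + 1) < r + 1 := (Int.ediv_lt_iff_lt_mul (by omega)).mpr (by nlinarith)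
        omega
      rw [hmax, ← Lsum]
      rw [Lsum_split N 1 (r + 1) N (by omega) (by omega)]
      ring
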